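-- pv_equiv track=rewrite | github.com/atdd-bdd/wordle | utilities.py | check_repeats
-- ===== SOURCE A (Python) =====
-- def check_repeats(word):
--     chars = {}
--     for c in word:
--         if chars.get(c) is None:
--             chars[c] = 1
--         else:
--             chars[c] += 1
--     out = ""
--     for key in chars.keys():
--         count = chars[key]
--         if count > 1:
--             out += key
--     return out
-- ===== SOURCE B (Python) =====
-- def check_repeats(word):
--     out = ""
--     for c in word:
--         if word.count(c) > 1 and c not in out:
--             out += c
--     return out
-- ===== Notes on version B (the rewrite author's own statement) =====
-- stated objective: simpler
-- what changed: Replaces the two-pass frequency-dictionary build with a single linear scan that appends a character when word.count(c) > 1 and it is not already in the output, preserving first-appearance order.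
import Mathlib
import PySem

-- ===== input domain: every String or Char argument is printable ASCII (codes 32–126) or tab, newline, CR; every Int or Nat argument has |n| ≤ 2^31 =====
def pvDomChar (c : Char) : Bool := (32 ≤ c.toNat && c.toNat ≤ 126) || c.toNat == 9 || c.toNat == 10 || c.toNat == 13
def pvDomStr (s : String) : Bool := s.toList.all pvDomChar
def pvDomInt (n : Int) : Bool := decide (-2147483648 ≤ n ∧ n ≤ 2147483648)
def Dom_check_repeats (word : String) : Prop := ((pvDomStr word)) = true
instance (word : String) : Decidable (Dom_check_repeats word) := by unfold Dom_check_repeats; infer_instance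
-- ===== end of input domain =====

-- B replaces A's frequency-dictionary build + keys pass with one linear scan that
-- appends c when word.count(c) > 1 and c is not yet in the output (objective: simpler).

-- ===== PORT A =====
def check_repeats (word : String) : String :=
  let cs := word.toList
  let chars : PySem.Dict Char Int := cs.foldl (fun d c =>
    match d.get? c with            -- if chars.get(c) is None: chars[c] = 1 else: chars[c] += 1
    | none => d.insert c 1
    | some v => d.insert c (v + 1)) PySem.Dict.empty
  -- for key in chars.keys(): count = chars[key] — key is drawn from chars.keys, so the
  -- lookup chars[key] never raises; getD … 0 is exact here.
  String.mk (chars.keys.foldl (fun out key =>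
    if chars.getD key 0 > 1 then out ++ [key] else out) [])

-- ===== PORT B =====
def check_repeats_alt (word : String) : String :=
  let cs := word.toList
  String.mk (cs.foldl (fun out c =>
    -- if word.count(c) > 1 and c not in out: out += c
    if 1 < PySem.Chars.count cs [c] ∧ ¬ PySem.Chars.isIn [c] out then out ++ [c] else out) [])

-- ===== PRECONDITION & SPEC =====
def Spec_check_repeats (word : String) (out : String) : Prop := out = check_repeats_alt word
instance (word : String) (out : String) : Decidable (Spec_check_repeats word out) := by unfold Spec_check_repeats; infer_instance

-- ===== CLAIM (what is proved, stated in full; the proofs are below) =====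
def Claim_equal_check_repeats : Prop := ∀ (word : String), Dom_check_repeats word → Spec_check_repeats word (check_repeats word)

-- ===== LEMMAS AND PROOFS =====

-- str.count of a single-character needle is List.count (fuel-indexed worker first)
theorem chars_count_go_single (c : Char) : ∀ (t : List Char) (fuel acc : Nat),
    t.length ≤ fuel → PySem.Chars.count.go [c] fuel t acc = acc + t.count c := by
  intro t
  induction t with
  | nil => intro fuel acc h; cases fuel <;> simp [PySem.Chars.count.go]
  | cons x t ih =>
    intro fuel acc h
    cases fuel with
    | zero => simp at h
    | succ fuel =>
      have hle : t.length ≤ fuel := by simpa using h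
      simp only [PySem.Chars.count.go]
      by_cases hc : c = x
      · subst hc
        simp [List.isPrefixOf, ih fuel (acc + 1) hle, List.count_cons]
        omega
      · simp [List.isPrefixOf, (by simpa using hc : (c == x) = false), ih fuel acc hle,
          List.count_cons, Ne.symm hc]

theorem chars_count_single (c : Char) (s : List Char) :
    PySem.Chars.count s [c] = s.count c := by
  simp [PySem.Chars.count, chars_count_go_single c s s.length 0 le_rfl]

-- 'c in s' for a single character is list membership
theorem chars_isIn_single (c : Char) (s : List Char) :
    PySem.Chars.isIn [c] s = s.contains c := by
  have h1 : PySem.Chars.isIn [c] s = true ↔ c ∈ s := by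
    rw [PySem.Chars.isIn_iff_infix]; exact List.singleton_infix_iff c s
  by_cases h : c ∈ s
  · simp [h1.mpr h, h]
  · have h2 : PySem.Chars.isIn [c] s = false :=
      Bool.not_eq_true _ |>.mp fun x => h (h1.mp x)
    simp [h2, h]

-- A's dict-building step is the counter step
theorem stepA_eq (d : PySem.Dict Char Int) (c : Char) :
    (match d.get? c with
     | none => d.insert c 1
     | some v => d.insert c (v + 1)) = d.insert c (d.getD c 0 + 1) := by
  cases h : d.get? c with
  | none => rw [PySem.Dict.getD_of_get?_eq_none (h := h)]; norm_num
  | some v => rw [PySem.Dict.getD_of_get?_eq_some (h := h)]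

-- B's loop invariant: starting from the filtered dedup of a prefix, folding the rest
-- of the word extends it to the filtered dedup of the whole
theorem foldB_inv (p : Char → Prop) [DecidablePred p] :
    ∀ (l pre : List Char),
      l.foldl (fun out c => if p c ∧ ¬ out.contains c then out ++ [c] else out)
        ((PySem.Set.ofList pre).filter (fun c => decide (p c)))
      = (PySem.Set.ofList (pre ++ l)).filter (fun c => decide (p c)) := by
  intro l
  induction l with
  | nil => simp
  | cons c l ih =>
    intro pre
    have hstep : (if p c ∧ ¬ ((PySem.Set.ofList pre).filter (fun c => decide (p c))).contains c
        then (PySem.Set.ofList pre).filter (fun c => decide (p c)) ++ [c]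
        else (PySem.Set.ofList pre).filter (fun c => decide (p c)))
        = (PySem.Set.ofList (pre ++ [c])).filter (fun c => decide (p c)) := by
      rw [PySem.Set.ofList_append_singleton]
      by_cases hm : c ∈ pre
      · have hmem : c ∈ PySem.Set.ofList pre := (PySem.Set.mem_ofList _ _).mpr hm
        rw [PySem.Set.add_of_mem (h := hmem)]
        by_cases hp : p c
        · have : c ∈ (PySem.Set.ofList pre).filter (fun c => decide (p c)) :=
            List.mem_filter.mpr ⟨hmem, by simpa using hp⟩
          simp [this]
        · simp [hp]
      · have hnm : c ∉ PySem.Set.ofList pre := fun h => hm ((PySem.Set.mem_ofList _ _).mp h)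
        rw [PySem.Set.add_of_not_mem (h := hnm)]
        have hnf : c ∉ (PySem.Set.ofList pre).filter (fun c => decide (p c)) :=
          fun h => hnm (List.mem_filter.mp h).1
        by_cases hp : p c <;> simp [hp, hnf, List.filter_append]
    rw [List.foldl_cons, hstep, ih (pre ++ [c]), List.append_assoc, List.singleton_append]

-- the two programs on the character list: both are the order-preserving dedup of cs
-- filtered by 'occurs more than once'
theorem core_eq (cs : List Char) :
    (let chars : PySem.Dict Char Int := cs.foldl (fun d c =>
      match d.get? c with
      | none => d.insert c 1
      | some v => d.insert c (v + 1)) PySem.Dict.empty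
    chars.keys.foldl (fun out key =>
      if chars.getD key 0 > 1 then out ++ [key] else out) ([] : List Char))
    = cs.foldl (fun out c =>
      if 1 < PySem.Chars.count cs [c] ∧ ¬ PySem.Chars.isIn [c] out then out ++ [c] else out) [] := by
  have hdict : cs.foldl (fun d c =>
      match d.get? c with
      | none => d.insert c 1
      | some v => d.insert c (v + 1)) (PySem.Dict.empty : PySem.Dict Char Int)
      = PySem.Dict.counter cs := by
    rw [PySem.List.foldl_congr_mem cs _ (fun d c => d.insert c (d.getD c 0 + 1)) _
        (fun d c _ => stepA_eq d c)]
    exact PySem.Dict.foldl_insert_getD_add_one_eq_counter cs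
  have hB : cs.foldl (fun out c =>
      if 1 < PySem.Chars.count cs [c] ∧ ¬ PySem.Chars.isIn [c] out then out ++ [c] else out) []
      = (PySem.Set.ofList cs).filter (fun c => decide (1 < cs.count c)) := by
    rw [PySem.List.foldl_congr_mem cs _
        (fun out c => if 1 < cs.count c ∧ ¬ out.contains c then out ++ [c] else out) _
        (fun out c _ => by simp only [chars_count_single, chars_isIn_single])]
    simpa using foldB_inv (fun c => 1 < cs.count c) cs []
  simp only [hdict, hB]
  rw [PySem.List.foldl_append_ite_eq_filter]
  rw [PySem.Dict.keys_counter]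
  simp only [List.nil_append]
  apply List.filter_congr
  intro c _
  simp [PySem.Dict.getD_counter]

-- ===== VERDICT (by name: the statement is the Claim_ definition above) =====
theorem check_repeats_spec : Claim_equal_check_repeats := by
  intro word _
  show check_repeats word = check_repeats_alt word
  unfold check_repeats check_repeats_alt
  exact congrArg String.mk (core_eq word.toList)
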